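-- pv_equiv track=rewrite | github.com/ayoubzulfiqar/Leetcode-Medium | PathWithMaximumMinimumValue/path_with_maximum_minimum_value.py | maximumMinimumPath
-- ===== SOURCE A (Python) =====
-- import collections
--
-- def maximumMinimumPath(grid: list[list[int]]) -> int:
--     rows = len(grid)
--     cols = len(grid[0])
--
--     low = 0
--     high = min(grid[0][0], grid[rows-1][cols-1])
--
--     ans = 0
--
--     directions = [(0, 1), (0, -1), (1, 0), (-1, 0)]
--
--     def check(val: int) -> bool:
--         if grid[0][0] < val:
--             return False
--
--         queue = collections.deque([(0, 0)])
--         visited = set([(0, 0)])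
--
--         while queue:
--             r, c = queue.popleft()
--
--             if r == rows - 1 and c == cols - 1:
--                 return True
--
--             for dr, dc in directions:
--                 nr, nc = r + dr, c + dc
--
--                 if 0 <= nr < rows and 0 <= nc < cols and (nr, nc) not in visited and grid[nr][nc] >= val:
--                     visited.add((nr, nc))
--                     queue.append((nr, nc))
--
--         return False
--
--     while low <= high:
--         mid = low + (high - low) // 2
--         if check(mid):
--             ans = mid
--             low = mid + 1
--         else:
--             high = mid - 1
--
--     return ans
-- ===== SOURCE B (Python) =====
-- def maximumMinimumPath(grid: list[list[int]]) -> int: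
--     rows = len(grid)
--     cols = len(grid[0])
--     high = min(grid[0][0], grid[rows - 1][cols - 1])
--
--     # bucket the in-bounds cells by value, keeping only usable threshold values
--     buckets = {}
--     for r in range(rows):
--         for c in range(cols):
--             v = grid[r][c]
--             if 0 <= v <= high:
--                 buckets.setdefault(v, []).append((r, c))
--
--     directions = [(0, 1), (0, -1), (1, 0), (-1, 0)]
--     visited = set()
--     # one incremental flood over the distinct candidate thresholds, descending:
--     # each cell is flooded at most once over the whole sweep
--     for v in sorted(buckets, reverse=True):
--         if not visited:
--             stack = [(0, 0)]
--             visited.add((0, 0))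
--         else:
--             stack = []
--             for p in buckets[v]:
--                 if p not in visited and any((p[0] + dr, p[1] + dc) in visited for dr, dc in directions):
--                     stack.append(p)
--                     visited.add(p)
--         while stack:
--             r, c = stack.pop()
--             for dr, dc in directions:
--                 nr, nc = r + dr, c + dc
--                 if 0 <= nr < rows and 0 <= nc < cols and (nr, nc) not in visited and grid[nr][nc] >= v:
--                     visited.add((nr, nc))
--                     stack.append((nr, nc))
--         if (rows - 1, cols - 1) in visited:
--             return v
--     return 0
-- ===== Notes on version B (the rewrite author's own statement) =====
-- stated objective: alternative
-- what changed: A binary-searches the answer over the value range [0, min(corner values)], re-running a full BFS flood for every probed threshold; B buckets the in-range cell values once, sorts the distinct candidate thresholds descending, and grows a single visited region incrementally (seeding each new threshold's cells that touch the region, then DFS-flooding), so every cell is flooded at most once over the whole sweep.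
-- outside the precondition, e.g. on maximumMinimumPath([[3, -1, -1], [-9], [-1, -1, 3]]): A returns 0, B raises IndexError
import Mathlib
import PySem

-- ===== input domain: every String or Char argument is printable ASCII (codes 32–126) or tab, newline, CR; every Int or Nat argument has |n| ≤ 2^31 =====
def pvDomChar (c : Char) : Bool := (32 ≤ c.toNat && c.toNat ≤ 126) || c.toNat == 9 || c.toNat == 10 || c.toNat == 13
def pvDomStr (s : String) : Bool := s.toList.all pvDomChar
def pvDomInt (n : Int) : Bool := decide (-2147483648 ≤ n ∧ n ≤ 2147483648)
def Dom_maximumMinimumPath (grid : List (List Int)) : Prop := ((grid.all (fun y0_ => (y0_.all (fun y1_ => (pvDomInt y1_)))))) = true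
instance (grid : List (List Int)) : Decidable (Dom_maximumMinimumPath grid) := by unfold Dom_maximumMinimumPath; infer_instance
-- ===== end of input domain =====

-- B replaces A's value-range binary search (a fresh BFS per probed threshold) by ONE
-- incremental descending flood over the distinct candidate cell values (each cell flooded
-- at most once); a timing run could not measure a difference on its generated inputs.

-- ===== PORT A =====

-- grid[r][c]; exact wherever Python's access returns (Pre_ keeps every performed access in range)
def pvCell (grid : List (List Int)) (r c : Int) : Int :=
  ((PySem.List.pyGet? grid r).bind (fun row => PySem.List.pyGet? row c)).getD 0

def pvDirs : List (Int × Int) := [(0, 1), (0, -1), (1, 0), (-1, 0)]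

def pvStep (grid : List (List Int)) (rows cols val r c : Int)
    (s : PySem.Set (Int × Int) × List (Int × Int)) (d : Int × Int) :
    PySem.Set (Int × Int) × List (Int × Int) :=
  let nr := r + d.1
  let nc := c + d.2
  if 0 ≤ nr ∧ nr < rows ∧ 0 ≤ nc ∧ nc < cols ∧ ¬ (PySem.Set.contains s.1 (nr, nc) = true) ∧ pvCell grid nr nc ≥ val
  then (PySem.Set.add s.1 (nr, nc), s.2 ++ [(nr, nc)])
  else s

def pvFuel (rows cols : Int) : Nat := 2 * (rows.toNat * cols.toNat) + 1

def pvBfs (grid : List (List Int)) (rows cols val : Int) :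
    Nat → List (Int × Int) → PySem.Set (Int × Int) → Bool
  | _, [], _ => false
  | 0, _, _ => false
  | fuel + 1, (r, c) :: rest, visited =>
    if r = rows - 1 ∧ c = cols - 1 then true
    else
      let st := pvDirs.foldl (pvStep grid rows cols val r c) (visited, rest)
      pvBfs grid rows cols val fuel st.2 st.1

def pvCheck (grid : List (List Int)) (rows cols val : Int) : Bool :=
  if pvCell grid 0 0 < val then false
  else pvBfs grid rows cols val (pvFuel rows cols) [(0, 0)] (PySem.Set.ofList [(0, 0)])

def pvBinSearch (grid : List (List Int)) (rows cols low high ans : Int) : Int :=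
  if hlh : low ≤ high then
    let mid := low + PySem.Int.floordiv (high - low) 2
    if pvCheck grid rows cols mid then pvBinSearch grid rows cols (mid + 1) high mid
    else pvBinSearch grid rows cols low (mid - 1) ans
  else ans
termination_by (high + 1 - low).toNat
decreasing_by
  · have h2 := PySem.Int.floordiv_eq_ediv_of_pos (a := high - low) (show (0:Int) < 2 by norm_num)
    have h3 : 0 ≤ (high - low) / 2 := Int.ediv_nonneg (by omega) (by norm_num)
    have h4 : (high - low) / 2 ≤ high - low := Int.ediv_le_self _ (by omega)
    omega
  · have h2 := PySem.Int.floordiv_eq_ediv_of_pos (a := high - low) (show (0:Int) < 2 by norm_num)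
    have h3 : 0 ≤ (high - low) / 2 := Int.ediv_nonneg (by omega) (by norm_num)
    have h4 : (high - low) / 2 ≤ high - low := Int.ediv_le_self _ (by omega)
    omega

def maximumMinimumPath (grid : List (List Int)) : Int :=
  let rows : Int := PySem.List.len grid
  let cols : Int := PySem.List.len ((PySem.List.pyGet? grid 0).getD [])
  let high : Int := min (pvCell grid 0 0) (pvCell grid (rows - 1) (cols - 1))
  pvBinSearch grid rows cols 0 high 0

-- ===== PORT B =====

def pvSeedStep (s : PySem.Set (Int × Int) × List (Int × Int)) (p : Int × Int) :
    PySem.Set (Int × Int) × List (Int × Int) :=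
  if ¬ (PySem.Set.contains s.1 p = true) ∧ pvDirs.any (fun d => PySem.Set.contains s.1 (p.1 + d.1, p.2 + d.2)) then
    (PySem.Set.add s.1 p, s.2 ++ [p])
  else s

def pvFlood (grid : List (List Int)) (rows cols val : Int) :
    Nat → List (Int × Int) → PySem.Set (Int × Int) → PySem.Set (Int × Int)
  | _, [], visited => visited
  | 0, _, visited => visited
  | fuel + 1, stack, visited =>
    match PySem.List.pop? stack with
    | none => visited
    | some ((r, c), rest) =>
      let st := pvDirs.foldl (pvStep grid rows cols val r c) (visited, rest)
      pvFlood grid rows cols val fuel st.2 st.1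

def pvBuckets (grid : List (List Int)) (rows cols high : Int) : PySem.Dict Int (List (Int × Int)) :=
  (PySem.List.pyRange 0 rows).foldl (fun d r =>
    (PySem.List.pyRange 0 cols).foldl (fun d c =>
      let v := pvCell grid r c
      if 0 ≤ v ∧ v ≤ high then d.modify v [] (· ++ [(r, c)]) else d) d) PySem.Dict.empty

def pvOuter (grid : List (List Int)) (rows cols : Int) (buckets : PySem.Dict Int (List (Int × Int))) :
    List Int → PySem.Set (Int × Int) → Int
  | [], _ => 0
  | v :: rest, visited =>
    let sv := if visited.isEmpty then (PySem.Set.add visited (0, 0), [(0, 0)])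
      else (buckets.getD v []).foldl pvSeedStep (visited, [])
    let visited' := pvFlood grid rows cols v (pvFuel rows cols) sv.2 sv.1
    if PySem.Set.contains visited' (rows - 1, cols - 1) then v
    else pvOuter grid rows cols buckets rest visited'

def maximumMinimumPath_alt (grid : List (List Int)) : Int :=
  let rows : Int := PySem.List.len grid
  let cols : Int := PySem.List.len ((PySem.List.pyGet? grid 0).getD [])
  let high : Int := min (pvCell grid 0 0) (pvCell grid (rows - 1) (cols - 1))
  let buckets := pvBuckets grid rows cols high
  pvOuter grid rows cols buckets (PySem.List.sorted buckets.keys (fun x => x) true) PySem.Set.empty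

-- ===== PRECONDITION & SPEC =====
-- Pre_ excludes the empty grid and grids whose first row is empty (Python A raises IndexError
-- there), and grids with a row shorter than the first row: on those Python's cell accesses
-- raise IndexError — B's bucketing pass always raises, A raises on all but a few where its
-- BFS never touches the missing cells.
def Pre_maximumMinimumPath (grid : List (List Int)) : Prop :=
  0 < grid.length ∧ 0 < (grid.headD []).length ∧ ∀ row ∈ grid, (grid.headD []).length ≤ row.length
instance (grid : List (List Int)) : Decidable (Pre_maximumMinimumPath grid) := by
  unfold Pre_maximumMinimumPath; infer_instance

def pvWitness_maximumMinimumPath : List (List Int) := [[5, 4], [1, 3]]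

def Spec_maximumMinimumPath (grid : List (List Int)) (out : Int) : Prop := out = maximumMinimumPath_alt grid
instance (grid : List (List Int)) (out : Int) : Decidable (Spec_maximumMinimumPath grid out) := by
  unfold Spec_maximumMinimumPath; infer_instance

-- ===== CLAIM (what is proved, stated in full; the proofs are below) =====
def Claim_equal_maximumMinimumPath : Prop := ∀ (grid : List (List Int)), Dom_maximumMinimumPath grid → Pre_maximumMinimumPath grid → Spec_maximumMinimumPath grid (maximumMinimumPath grid)

-- ===== LEMMAS AND PROOFS =====

def pvInb (rows cols : Int) (p : Int × Int) : Prop :=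
  0 ≤ p.1 ∧ p.1 < rows ∧ 0 ≤ p.2 ∧ p.2 < cols

def pvOk (grid : List (List Int)) (rows cols val : Int) (p : Int × Int) : Prop :=
  pvInb rows cols p ∧ pvCell grid p.1 p.2 ≥ val

def pvNbr (p d : Int × Int) : Int × Int := (p.1 + d.1, p.2 + d.2)

inductive pvReach (grid : List (List Int)) (rows cols val : Int) : Int × Int → Prop where
  | start : pvReach grid rows cols val (0, 0)
  | step {p q : Int × Int} : pvReach grid rows cols val p → (∃ d ∈ pvDirs, q = pvNbr p d) →
      pvOk grid rows cols val q → pvReach grid rows cols val q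

lemma pvDirs_neg : ∀ d ∈ pvDirs, ((-d.1, -d.2) : Int × Int) ∈ pvDirs := by decide

lemma pvNbr_neg (p d : Int × Int) : pvNbr (pvNbr p d) (-d.1, -d.2) = p := by
  simp [pvNbr]

lemma pvReach_mono {grid : List (List Int)} {rows cols a b : Int} {p : Int × Int}
    (hab : a ≤ b) (h : pvReach grid rows cols b p) : pvReach grid rows cols a p := by
  induction h with
  | start => exact .start
  | step hp hadj hq ih => exact .step ih hadj ⟨hq.1, le_trans hab hq.2⟩

lemma pvReach_inb {grid : List (List Int)} {rows cols val : Int} {p : Int × Int}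
    (hr : 1 ≤ rows) (hc : 1 ≤ cols) (h : pvReach grid rows cols val p) : pvInb rows cols p := by
  induction h with
  | start => exact ⟨by omega, by omega, by omega, by omega⟩
  | step hp hadj hq ih => exact hq.1

lemma pvCard {rows cols : Int} (l : List (Int × Int)) (hnd : l.Nodup)
    (hin : ∀ p ∈ l, pvInb rows cols p) : l.length ≤ rows.toNat * cols.toNat := by
  classical
  have h1 : l.toFinset ⊆ Finset.Icc (0:Int) (rows-1) ×ˢ Finset.Icc (0:Int) (cols-1) := by
    intro p hp
    rw [List.mem_toFinset] at hp
    rcases hin p hp with ⟨a, b, c, d⟩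
    simp only [Finset.mem_product, Finset.mem_Icc]
    omega
  have h2 := Finset.card_le_card h1
  rw [List.toFinset_card_of_nodup hnd, Finset.card_product, Int.card_Icc, Int.card_Icc] at h2
  have e1 : (rows - 1 + 1 - 0).toNat = rows.toNat := by omega
  have e2 : (cols - 1 + 1 - 0).toNat = cols.toNat := by omega
  rw [e1, e2] at h2
  exact h2

lemma pvStep_fold (grid : List (List Int)) (rows cols val r c : Int)
    (ds : List (Int × Int)) (vis : PySem.Set (Int × Int)) (qu : List (Int × Int)) :
    ∃ news,
      ds.foldl (pvStep grid rows cols val r c) (vis, qu) = (vis ++ news, qu ++ news) ∧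
      news.Nodup ∧ (∀ x ∈ news, x ∉ vis) ∧
      (∀ x ∈ news, pvOk grid rows cols val x ∧ ∃ d ∈ ds, x = pvNbr (r, c) d) ∧
      (∀ d ∈ ds, pvOk grid rows cols val (pvNbr (r, c) d) → pvNbr (r, c) d ∈ vis ++ news) := by
  induction ds generalizing vis qu with
  | nil => exact ⟨[], by simp, by simp, by simp, by simp, by simp⟩
  | cons d ds ih =>
    simp only [List.foldl_cons]
    by_cases hC : (0 ≤ r + d.1 ∧ r + d.1 < rows ∧ 0 ≤ c + d.2 ∧ c + d.2 < cols ∧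
        ¬ (PySem.Set.contains vis (r + d.1, c + d.2) = true) ∧ pvCell grid (r + d.1) (c + d.2) ≥ val)
    · have hadd : PySem.Set.add vis (r + d.1, c + d.2) = vis ++ [(r + d.1, c + d.2)] := by
        unfold PySem.Set.add
        rw [if_neg hC.2.2.2.2.1]
      have hstep : pvStep grid rows cols val r c (vis, qu) d =
          (vis ++ [(r + d.1, c + d.2)], qu ++ [(r + d.1, c + d.2)]) := by
        unfold pvStep
        rw [if_pos hC, hadd]
      rw [hstep]
      obtain ⟨news, heq, hnd, hfresh, hok, hcomp⟩ :=
        ih (vis ++ [(r + d.1, c + d.2)]) (qu ++ [(r + d.1, c + d.2)])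
      have hnmem : (r + d.1, c + d.2) ∉ vis := by
        intro hmem
        exact hC.2.2.2.2.1 ((PySem.Set.contains_iff vis _).2 hmem)
      refine ⟨(r + d.1, c + d.2) :: news, ?_, ?_, ?_, ?_, ?_⟩
      · rw [heq]; simp
      · refine List.nodup_cons.2 ⟨fun hmem => ?_, hnd⟩
        exact hfresh _ hmem (by simp)
      · intro x hx
        rcases List.mem_cons.1 hx with rfl | hx
        · exact hnmem
        · intro hxv; exact hfresh x hx (by simp [hxv])
      · intro x hx
        rcases List.mem_cons.1 hx with rfl | hx
        · refine ⟨⟨⟨hC.1, hC.2.1, hC.2.2.1, hC.2.2.2.1⟩, hC.2.2.2.2.2⟩, d, by simp [pvNbr]⟩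
        · obtain ⟨hok1, d', hd', he⟩ := hok x hx
          exact ⟨hok1, d', by simp [hd'], he⟩
      · intro d' hd' hokd
        rcases List.mem_cons.1 hd' with rfl | hd'
        · simp [pvNbr]
        · have := hcomp d' hd' hokd
          simpa [List.append_assoc] using this
    · have hstep : pvStep grid rows cols val r c (vis, qu) d = (vis, qu) := by
        unfold pvStep
        rw [if_neg hC]
      rw [hstep]
      obtain ⟨news, heq, hnd, hfresh, hok, hcomp⟩ := ih vis qu
      refine ⟨news, heq, hnd, hfresh, ?_, ?_⟩
      · intro x hx
        obtain ⟨hok1, d', hd', he⟩ := hok x hx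
        exact ⟨hok1, d', by simp [hd'], he⟩
      · intro d' hd' hokd
        rcases List.mem_cons.1 hd' with rfl | hd'
        · -- the condition failed: since ok holds, it must be membership
          push_neg at hC
          obtain ⟨⟨h1, h2, h3, h4⟩, h5⟩ := hokd
          simp only [pvNbr] at h1 h2 h3 h4 h5 ⊢
          have hcont := hC h1 h2 h3 h4
          rcases Classical.em (PySem.Set.contains vis (r + d'.1, c + d'.2) = true) with hc | hc
          · exact List.mem_append_left _ ((PySem.Set.contains_iff vis _).1 hc)
          · exact absurd h5 (by simpa using hcont hc)
        · exact hcomp d' hd' hokd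

structure pvInv (grid : List (List Int)) (rows cols val : Int) (fuel : Nat)
    (work visited : List (Int × Int)) : Prop where
  nodupV : visited.Nodup
  inbV : ∀ p ∈ visited, pvInb rows cols p
  subWV : ∀ p ∈ work, p ∈ visited
  nodupW : work.Nodup
  closedNW : ∀ p ∈ visited, p ∉ work → ∀ d ∈ pvDirs, pvOk grid rows cols val (pvNbr p d) → pvNbr p d ∈ visited
  fuelOk : work.length + 2 * (rows.toNat * cols.toNat) ≤ fuel + 2 * visited.length

lemma pvInv_step {grid : List (List Int)} {rows cols val : Int} {fuel : Nat}
    {work visited rest news : List (Int × Int)} {r c : Int}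
    (hInv : pvInv grid rows cols val (fuel + 1) work visited)
    (hperm : work.Perm ((r, c) :: rest))
    (hnd : news.Nodup) (hfresh : ∀ x ∈ news, x ∉ visited)
    (hok : ∀ x ∈ news, pvOk grid rows cols val x ∧ ∃ d ∈ pvDirs, x = pvNbr (r, c) d)
    (hcomp : ∀ d ∈ pvDirs, pvOk grid rows cols val (pvNbr (r, c) d) → pvNbr (r, c) d ∈ visited ++ news) :
    pvInv grid rows cols val fuel (rest ++ news) (visited ++ news) := by
  have hsub : ∀ p ∈ rest, p ∈ visited := fun p hp =>
    hInv.subWV p (hperm.mem_iff.2 (List.mem_cons_of_mem _ hp))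
  have hrc : (r, c) ∈ visited := hInv.subWV _ (hperm.mem_iff.2 (List.mem_cons_self))
  have hwnd : ((r, c) :: rest).Nodup := hperm.nodup_iff.1 hInv.nodupW
  refine ⟨?_, ?_, ?_, ?_, ?_, ?_⟩
  · exact List.Nodup.append hInv.nodupV hnd (fun x hx hx2 => hfresh x hx2 hx)
  · intro p hp
    rcases List.mem_append.1 hp with hp | hp
    · exact hInv.inbV p hp
    · exact (hok p hp).1.1
  · intro p hp
    rcases List.mem_append.1 hp with hp | hp
    · exact List.mem_append_left _ (hsub p hp)
    · exact List.mem_append_right _ hp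
  · exact List.Nodup.append ((List.nodup_cons.1 hwnd).2) hnd
      (fun x hx hx2 => hfresh x hx2 (hsub x hx))
  · intro p hp hpn d hd hokd
    rcases List.mem_append.1 hp with hp | hp
    · by_cases hprc : p = (r, c)
      · subst hprc
        exact hcomp d hd hokd
      · have hpw : p ∉ work := by
          intro hpw
          rcases List.mem_cons.1 (hperm.mem_iff.1 hpw) with h | h
          · exact hprc h
          · exact hpn (List.mem_append_left _ h)
        have := hInv.closedNW p hp hpw d hd hokd
        exact List.mem_append_left _ this
    · exact absurd (List.mem_append_right rest hp) hpn
  · have hlen : work.length = rest.length + 1 := by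
      have := hperm.length_eq
      simpa using this
    have := hInv.fuelOk
    simp only [List.length_append] at *
    omega

lemma pvReach_mem_closed {grid : List (List Int)} {rows cols val : Int} {p : Int × Int}
    (h : pvReach grid rows cols val p) (W : List (Int × Int)) (h0 : (0, 0) ∈ W)
    (hcl : ∀ x ∈ W, ∀ d ∈ pvDirs, pvOk grid rows cols val (pvNbr x d) → pvNbr x d ∈ W) :
    p ∈ W := by
  induction h with
  | start => exact h0
  | step hp hadj hq ih =>
    obtain ⟨d, hd, rfl⟩ := hadj
    exact hcl _ ih d hd hq

lemma pvBfs_sound {grid : List (List Int)} {rows cols val : Int} :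
    ∀ (fuel : Nat) (work visited : List (Int × Int)),
      (∀ p ∈ work, p ∈ visited) → (∀ p ∈ visited, pvReach grid rows cols val p) →
      pvBfs grid rows cols val fuel work visited = true →
      pvReach grid rows cols val (rows - 1, cols - 1) := by
  intro fuel
  induction fuel with
  | zero =>
    intro work visited hsub hreach h
    cases work with
    | nil => simp [pvBfs] at h
    | cons p rest => obtain ⟨r, c⟩ := p; simp [pvBfs] at h
  | succ fuel ih =>
    intro work visited hsub hreach h
    cases work with
    | nil => simp [pvBfs] at h
    | cons p rest =>
      obtain ⟨r, c⟩ := p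
      by_cases ht : r = rows - 1 ∧ c = cols - 1
      · obtain ⟨h1, h2⟩ := ht
        subst h1; subst h2
        exact hreach _ (hsub _ List.mem_cons_self)
      · simp only [pvBfs, if_neg ht] at h
        obtain ⟨news, heq, hnd, hfresh, hok, hcomp⟩ :=
          pvStep_fold grid rows cols val r c pvDirs visited rest
        rw [heq] at h
        refine ih _ _ ?_ ?_ h
        · intro q hq
          rcases List.mem_append.1 hq with hq | hq
          · exact List.mem_append_left _ (hsub q (List.mem_cons_of_mem _ hq))
          · exact List.mem_append_right _ hq
        · intro q hq
          rcases List.mem_append.1 hq with hq | hq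
          · exact hreach q hq
          · obtain ⟨hokq, d, hd, rfl⟩ := hok q hq
            exact .step (hreach _ (hsub _ List.mem_cons_self)) ⟨d, hd, rfl⟩ hokq

lemma pvBfs_false {grid : List (List Int)} {rows cols val : Int} :
    ∀ (fuel : Nat) (work visited : List (Int × Int)),
      pvInv grid rows cols val fuel work visited →
      ((rows - 1, cols - 1) ∈ visited → (rows - 1, cols - 1) ∈ work) →
      pvBfs grid rows cols val fuel work visited = false →
      ∃ W : List (Int × Int), (∀ p ∈ visited, p ∈ W) ∧ (rows - 1, cols - 1) ∉ W ∧
        (∀ x ∈ W, ∀ d ∈ pvDirs, pvOk grid rows cols val (pvNbr x d) → pvNbr x d ∈ W) := by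
  intro fuel
  induction fuel with
  | zero =>
    intro work visited hInv htq _
    cases work with
    | nil =>
      refine ⟨visited, fun p hp => hp, fun hmem => by simpa using htq hmem, ?_⟩
      intro x hx d hd hokd
      exact hInv.closedNW x hx (by simp) d hd hokd
    | cons p rest =>
      exfalso
      have hcard := pvCard visited hInv.nodupV hInv.inbV
      have := hInv.fuelOk
      simp only [List.length_cons] at this
      omega
  | succ fuel ih =>
    intro work visited hInv htq h
    cases work with
    | nil =>
      refine ⟨visited, fun p hp => hp, fun hmem => by simpa using htq hmem, ?_⟩
      intro x hx d hd hokd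
      exact hInv.closedNW x hx (by simp) d hd hokd
    | cons p rest =>
      obtain ⟨r, c⟩ := p
      by_cases ht : r = rows - 1 ∧ c = cols - 1
      · exact absurd h (by simp [pvBfs, if_pos ht])
      · simp only [pvBfs, if_neg ht] at h
        obtain ⟨news, heq, hnd, hfresh, hok, hcomp⟩ :=
          pvStep_fold grid rows cols val r c pvDirs visited rest
        rw [heq] at h
        have hInv' := pvInv_step hInv (List.Perm.refl _) hnd hfresh hok hcomp
        have htq' : (rows - 1, cols - 1) ∈ visited ++ news → (rows - 1, cols - 1) ∈ rest ++ news := by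
          intro hmem
          rcases List.mem_append.1 hmem with hmem | hmem
          · have := htq hmem
            rcases List.mem_cons.1 this with he | he
            · exact absurd ⟨(congrArg Prod.fst he).symm, (congrArg Prod.snd he).symm⟩ ht
            · exact List.mem_append_left _ he
          · exact List.mem_append_right _ hmem
        obtain ⟨W, hW1, hW2, hW3⟩ := ih _ _ hInv' htq' h
        exact ⟨W, fun p hp => hW1 p (List.mem_append_left _ hp), hW2, hW3⟩

lemma pvCheck_iff {grid : List (List Int)} {rows cols val : Int}
    (hr : 1 ≤ rows) (hc : 1 ≤ cols) :
    pvCheck grid rows cols val = true ↔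
      (val ≤ pvCell grid 0 0 ∧ pvReach grid rows cols val (rows - 1, cols - 1)) := by
  unfold pvCheck
  by_cases hg : pvCell grid 0 0 < val
  · simp only [if_pos hg]
    constructor
    · intro h; exact absurd h (by simp)
    · intro h; omega
  · simp only [if_neg hg]
    have hofl : (PySem.Set.ofList [((0:Int), (0:Int))]) = [(0, 0)] := rfl
    constructor
    · intro h
      refine ⟨by omega, ?_⟩
      refine pvBfs_sound (pvFuel rows cols) [(0, 0)] [(0, 0)] ?_ ?_ (by rw [hofl] at h; exact h)
      · intro p hp; exact hp
      · intro p hp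
        rcases List.mem_singleton.1 hp with rfl
        exact .start
    · rintro ⟨hv, hreach⟩
      by_contra hfalse
      rw [hofl] at hfalse
      have hfalse' : pvBfs grid rows cols val (pvFuel rows cols) [(0, 0)] [(0, 0)] = false :=
        Bool.not_eq_true _ ▸ (Bool.eq_false_iff.2 hfalse)
      have hInv : pvInv grid rows cols val (pvFuel rows cols) [(0, 0)] [(0, 0)] := by
        refine ⟨by simp, ?_, by simp, by simp, ?_, ?_⟩
        · intro p hp
          rcases List.mem_singleton.1 hp with rfl
          exact ⟨by omega, by omega, by omega, by omega⟩
        · intro p hp hpn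
          exact absurd hp hpn
        · simp [pvFuel]
          omega
      obtain ⟨W, hW1, hW2, hW3⟩ := pvBfs_false _ _ _ hInv (fun hm => by
        rcases List.mem_singleton.1 hm with he
        simp [he]) hfalse'
      exact hW2 (pvReach_mem_closed hreach W (hW1 _ (by simp)) hW3)

lemma pvCheck_mono {grid : List (List Int)} {rows cols a b : Int}
    (hr : 1 ≤ rows) (hc : 1 ≤ cols) (hab : a ≤ b)
    (h : pvCheck grid rows cols b = true) : pvCheck grid rows cols a = true := by
  rw [pvCheck_iff hr hc] at h ⊢
  exact ⟨le_trans hab h.1, pvReach_mono hab h.2⟩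

lemma pvBinSearch_spec {grid : List (List Int)} {rows cols : Int} (high0 : Int)
    (hr : 1 ≤ rows) (hc : 1 ≤ cols) :
    ∀ (low high ans : Int), 0 ≤ low → high ≤ high0 → 0 ≤ ans →
      (ans = 0 ∨ (pvCheck grid rows cols ans = true ∧ ans ≤ high0)) →
      (∀ v, high < v → v ≤ high0 → ¬ pvCheck grid rows cols v = true) →
      (∀ v, ans < v → v < low → ¬ pvCheck grid rows cols v = true) →
      (0 ≤ pvBinSearch grid rows cols low high ans ∧
       (pvBinSearch grid rows cols low high ans = 0 ∨
         (pvCheck grid rows cols (pvBinSearch grid rows cols low high ans) = true ∧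
          pvBinSearch grid rows cols low high ans ≤ high0)) ∧
       (∀ v, pvBinSearch grid rows cols low high ans < v → v ≤ high0 →
          ¬ pvCheck grid rows cols v = true)) := by
  intro low high ans h0 hh ha h1 hhi hmid
  rw [pvBinSearch]
  by_cases hlh : low ≤ high
  · rw [dif_pos hlh]
    have hb : low ≤ low + PySem.Int.floordiv (high - low) 2 ∧
        low + PySem.Int.floordiv (high - low) 2 ≤ high := by
      have h2 := PySem.Int.floordiv_eq_ediv_of_pos (a := high - low) (show (0:Int) < 2 by norm_num)
      have h3 : 0 ≤ (high - low) / 2 := Int.ediv_nonneg (by omega) (by norm_num)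
      have h4 : (high - low) / 2 ≤ high - low := Int.ediv_le_self _ (by omega)
      omega
    by_cases hcheck : pvCheck grid rows cols (low + PySem.Int.floordiv (high - low) 2) = true
    · rw [if_pos hcheck]
      exact pvBinSearch_spec high0 hr hc _ high _ (by omega) hh (by omega)
        (Or.inr ⟨hcheck, by omega⟩) hhi (fun v hv1 hv2 => (by omega : False).elim)
    · rw [if_neg hcheck]
      refine pvBinSearch_spec high0 hr hc low _ ans h0 (by omega) ha h1 ?_ hmid
      intro v hv1 hv2 hP
      exact hcheck (pvCheck_mono hr hc (by omega) hP)
  · rw [dif_neg hlh]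
    refine ⟨ha, h1, ?_⟩
    intro v hv1 hv2 hP
    by_cases hvlow : v < low
    · exact hmid v hv1 hvlow hP
    · exact hhi v (by omega) hv2 hP
termination_by low high ans => (high + 1 - low).toNat
decreasing_by
  · have h2 := PySem.Int.floordiv_eq_ediv_of_pos (a := high - low) (show (0:Int) < 2 by norm_num)
    have h3 : 0 ≤ (high - low) / 2 := Int.ediv_nonneg (by omega) (by norm_num)
    have h4 : (high - low) / 2 ≤ high - low := Int.ediv_le_self _ (by omega)
    omega
  · have h2 := PySem.Int.floordiv_eq_ediv_of_pos (a := high - low) (show (0:Int) < 2 by norm_num)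
    have h3 : 0 ≤ (high - low) / 2 := Int.ediv_nonneg (by omega) (by norm_num)
    have h4 : (high - low) / 2 ≤ high - low := Int.ediv_le_self _ (by omega)
    omega

lemma pvFlood_spec {grid : List (List Int)} {rows cols val : Int} :
    ∀ (fuel : Nat) (stack visited : List (Int × Int)),
      pvInv grid rows cols val fuel stack visited →
      (∀ p ∈ visited, pvReach grid rows cols val p) →
      (∀ p ∈ visited, p ∈ pvFlood grid rows cols val fuel stack visited) ∧
      (pvFlood grid rows cols val fuel stack visited).Nodup ∧
      (∀ p ∈ pvFlood grid rows cols val fuel stack visited, pvInb rows cols p) ∧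
      (∀ p ∈ pvFlood grid rows cols val fuel stack visited, pvReach grid rows cols val p) ∧
      (∀ x ∈ pvFlood grid rows cols val fuel stack visited, ∀ d ∈ pvDirs,
        pvOk grid rows cols val (pvNbr x d) → pvNbr x d ∈ pvFlood grid rows cols val fuel stack visited) := by
  intro fuel
  induction fuel with
  | zero =>
    intro stack visited hInv hsound
    cases stack with
    | nil =>
      simp only [pvFlood]
      exact ⟨fun p hp => hp, hInv.nodupV, hInv.inbV, hsound,
        fun x hx d hd hokd => hInv.closedNW x hx (by simp) d hd hokd⟩
    | cons a l =>
      exfalso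
      have hcard := pvCard visited hInv.nodupV hInv.inbV
      have := hInv.fuelOk
      simp only [List.length_cons] at this
      omega
  | succ fuel ih =>
    intro stack visited hInv hsound
    cases stack with
    | nil =>
      simp only [pvFlood]
      exact ⟨fun p hp => hp, hInv.nodupV, hInv.inbV, hsound,
        fun x hx d hd hokd => hInv.closedNW x hx (by simp) d hd hokd⟩
    | cons a l =>
      obtain ⟨xs, p, hxp⟩ := (List.eq_nil_or_concat (a :: l)).resolve_left (by simp)
      rw [List.concat_eq_append] at hxp
      obtain ⟨r, c⟩ := p
      have hrc : (r, c) ∈ visited := hInv.subWV _ (by rw [hxp]; exact List.mem_append_right _ (List.mem_singleton.2 rfl))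
      obtain ⟨news, heq, hnd, hfresh, hok, hcomp⟩ :=
        pvStep_fold grid rows cols val r c pvDirs visited xs
      have hperm : (a :: l).Perm ((r, c) :: xs) := by
        rw [hxp]; exact List.perm_append_singleton _ _
      have hInv' := pvInv_step hInv hperm hnd hfresh hok hcomp
      have hsound' : ∀ q ∈ visited ++ news, pvReach grid rows cols val q := by
        intro q hq
        rcases List.mem_append.1 hq with hq | hq
        · exact hsound q hq
        · obtain ⟨hokq, d, hd, rfl⟩ := hok q hq
          exact .step (hsound _ hrc) ⟨d, hd, rfl⟩ hokq
      have hpop : PySem.List.pop? (a :: l) = some ((r, c), xs) := by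
        rw [hxp]; exact PySem.List.pop?_last xs (r, c)
      have hres : pvFlood grid rows cols val (fuel + 1) (a :: l) visited
          = pvFlood grid rows cols val fuel (xs ++ news) (visited ++ news) := by
        show (match PySem.List.pop? (a :: l) with
          | none => visited
          | some ((r, c), rest) =>
            pvFlood grid rows cols val fuel
              (pvDirs.foldl (pvStep grid rows cols val r c) (visited, rest)).2
              (pvDirs.foldl (pvStep grid rows cols val r c) (visited, rest)).1) =
          pvFlood grid rows cols val fuel (xs ++ news) (visited ++ news)
        rw [hpop]
        show pvFlood grid rows cols val fuel
            (pvDirs.foldl (pvStep grid rows cols val r c) (visited, xs)).2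
            (pvDirs.foldl (pvStep grid rows cols val r c) (visited, xs)).1 =
          pvFlood grid rows cols val fuel (xs ++ news) (visited ++ news)
        rw [heq]
      rw [hres]
      obtain ⟨hA, hB, hC, hD, hE⟩ := ih _ _ hInv' hsound'
      exact ⟨fun q hq => hA q (List.mem_append_left _ hq), hB, hC, hD, hE⟩

lemma pvSeed_fold {grid : List (List Int)} {rows cols val : Int} :
    ∀ (bl : List (Int × Int)) (vis : PySem.Set (Int × Int)) (acc : List (Int × Int)),
      (∀ q ∈ bl, pvOk grid rows cols val q) →
      (∀ p ∈ vis, pvReach grid rows cols val p) →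
      vis.Nodup →
      ∃ seeds,
        bl.foldl pvSeedStep (vis, acc) = (vis ++ seeds, acc ++ seeds) ∧
        (vis ++ seeds).Nodup ∧
        (∀ x ∈ seeds, x ∈ bl) ∧
        (∀ p ∈ vis ++ seeds, pvReach grid rows cols val p) ∧
        (∀ q ∈ bl, (∃ d ∈ pvDirs, pvNbr q d ∈ vis) → q ∈ vis ++ seeds) := by
  intro bl
  induction bl with
  | nil =>
    intro vis acc hbl hv hnd
    refine ⟨[], by simp, by simpa using hnd, by simp, by simpa using hv, by simp⟩
  | cons q bl ih =>
    intro vis acc hbl hv hnd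
    simp only [List.foldl_cons]
    by_cases hC : (¬ (PySem.Set.contains vis q = true) ∧
        pvDirs.any (fun d => PySem.Set.contains vis (q.1 + d.1, q.2 + d.2)))
    · have hstep : pvSeedStep (vis, acc) q = (vis ++ [q], acc ++ [q]) := by
        unfold pvSeedStep
        rw [if_pos hC]
        unfold PySem.Set.add
        rw [if_neg hC.1]
      rw [hstep]
      obtain ⟨d, hd, hcont⟩ := List.any_eq_true.1 hC.2
      have hqreach : pvReach grid rows cols val q := by
        have hn : ((q.1 + d.1, q.2 + d.2) : Int × Int) ∈ vis := (PySem.Set.contains_iff _ _).1 hcont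
        exact .step (hv _ hn) ⟨(-d.1, -d.2), pvDirs_neg d hd, (pvNbr_neg q d).symm⟩
          (hbl q List.mem_cons_self)
      have hqfresh : q ∉ vis := fun hmem => hC.1 ((PySem.Set.contains_iff _ _).2 hmem)
      have hv' : ∀ p ∈ vis ++ [q], pvReach grid rows cols val p := by
        intro p hp
        rcases List.mem_append.1 hp with hp | hp
        · exact hv p hp
        · rcases List.mem_singleton.1 hp with rfl; exact hqreach
      have hnd' : (vis ++ [q]).Nodup := by
        refine List.Nodup.append hnd (by simp) ?_
        intro x hx hx2
        rcases List.mem_singleton.1 hx2 with rfl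
        exact hqfresh hx
      obtain ⟨seeds, heq, hnd2, hsub, hreach2, hcompl⟩ :=
        ih (vis ++ [q]) (acc ++ [q]) (fun p hp => hbl p (List.mem_cons_of_mem _ hp)) hv' hnd'
      refine ⟨q :: seeds, ?_, ?_, ?_, ?_, ?_⟩
      · rw [heq]; simp
      · rw [List.append_cons]; exact hnd2
      · intro x hx
        rcases List.mem_cons.1 hx with rfl | hx
        · exact List.mem_cons_self
        · exact List.mem_cons_of_mem _ (hsub x hx)
      · intro p hp
        rw [List.append_cons] at hp
        exact hreach2 p hp
      · intro q' hq' hex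
        rcases List.mem_cons.1 hq' with rfl | hq'
        · rw [List.append_cons]
          exact List.mem_append_left _ (List.mem_append_right _ (List.mem_singleton.2 rfl))
        · rw [List.append_cons]
          refine hcompl q' hq' ?_
          obtain ⟨d', hd', hmem⟩ := hex
          exact ⟨d', hd', List.mem_append_left _ hmem⟩
    · have hstep : pvSeedStep (vis, acc) q = (vis, acc) := by
        unfold pvSeedStep
        rw [if_neg hC]
      rw [hstep]
      obtain ⟨seeds, heq, hnd2, hsub, hreach2, hcompl⟩ :=
        ih vis acc (fun p hp => hbl p (List.mem_cons_of_mem _ hp)) hv hnd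
      refine ⟨seeds, heq, hnd2, fun x hx => List.mem_cons_of_mem _ (hsub x hx), hreach2, ?_⟩
      intro q' hq' hex
      rcases List.mem_cons.1 hq' with rfl | hq'
      · rcases Classical.em (PySem.Set.contains vis q' = true) with hc | hc
        · exact List.mem_append_left _ ((PySem.Set.contains_iff _ _).1 hc)
        · exfalso
          have hany : ¬ (pvDirs.any (fun d => PySem.Set.contains vis (q'.1 + d.1, q'.2 + d.2)) = true) := by
            intro hany
            exact hC ⟨hc, hany⟩
          obtain ⟨d', hd', hmem⟩ := hex
          exact hany (List.any_eq_true.2 ⟨d', hd', (PySem.Set.contains_iff _ _).2 hmem⟩)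
      · exact hcompl q' hq' hex

def pvRM (rows cols : Int) : List (Int × Int) :=
  (PySem.List.pyRange 0 rows).flatMap (fun r => (PySem.List.pyRange 0 cols).map (fun c => (r, c)))

def pvPairs (grid : List (List Int)) (rows cols high : Int) : List (Int × (Int × Int)) :=
  ((pvRM rows cols).filter
    (fun p => decide (0 ≤ pvCell grid p.1 p.2 ∧ pvCell grid p.1 p.2 ≤ high))).map
    (fun p => (pvCell grid p.1 p.2, p))

lemma pvRM_mem {rows cols : Int} (p : Int × Int) : p ∈ pvRM rows cols ↔ pvInb rows cols p := by
  obtain ⟨a, b⟩ := p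
  simp only [pvRM, List.mem_flatMap, List.mem_map, PySem.List.mem_pyRange_one, pvInb]
  constructor
  · rintro ⟨r, ⟨h1, h2⟩, c, ⟨h3, h4⟩, he⟩
    cases he
    exact ⟨h1, h2, h3, h4⟩
  · rintro ⟨h1, h2, h3, h4⟩
    exact ⟨a, ⟨h1, h2⟩, b, ⟨h3, h4⟩, rfl⟩

lemma pvBuckets_eq {grid : List (List Int)} {rows cols high : Int} :
    pvBuckets grid rows cols high =
      (pvPairs grid rows cols high).foldl
        (fun d q => d.modify q.1 [] (· ++ [q.2])) PySem.Dict.empty := by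
  unfold pvPairs
  rw [List.foldl_map, List.foldl_filter]
  unfold pvRM
  rw [List.foldl_flatMap]
  unfold pvBuckets
  refine List.foldl_ext _ _ _ ?_
  intro d r _
  rw [List.foldl_map]
  refine List.foldl_ext _ _ _ ?_
  intro d' c _
  simp only [decide_eq_true_eq]

lemma pvBuckets_getD {grid : List (List Int)} {rows cols high : Int} (v : Int) (p : Int × Int) :
    p ∈ (pvBuckets grid rows cols high).getD v [] ↔
      (pvInb rows cols p ∧ pvCell grid p.1 p.2 = v ∧ 0 ≤ v ∧ v ≤ high) := by
  rw [pvBuckets_eq, PySem.Dict.getD_foldl_modify_append, PySem.Dict.getD_empty]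
  simp only [List.nil_append, List.mem_map, List.mem_filter, pvPairs, List.mem_map]
  constructor
  · rintro ⟨⟨w, q⟩, ⟨⟨q', hq', he'⟩, hbeq⟩, rfl⟩
    cases he'
    simp only [beq_iff_eq] at hbeq
    obtain ⟨hmem, hcond⟩ := hq'
    simp only [decide_eq_true_eq] at hcond
    exact ⟨(pvRM_mem _).1 hmem, by simpa using hbeq, by omega, by omega⟩
  · rintro ⟨hinb, hval, h0, hh⟩
    refine ⟨(v, p), ⟨⟨p, ?_, by rw [hval]⟩, by simp⟩, rfl⟩
    exact ⟨(pvRM_mem _).2 hinb, by simp only [decide_eq_true_eq]; omega⟩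

def pvIsCand (grid : List (List Int)) (rows cols high v : Int) : Prop :=
  0 ≤ v ∧ v ≤ high ∧ ∃ p, pvInb rows cols p ∧ pvCell grid p.1 p.2 = v

lemma pvBuckets_keys {grid : List (List Int)} {rows cols high : Int} (w : Int) :
    w ∈ (pvBuckets grid rows cols high).keys ↔ pvIsCand grid rows cols high w := by
  rw [pvBuckets_eq, PySem.Dict.keys_foldl_modify_key _ Prod.fst [] (fun _ q => (· ++ [q.2])),
    PySem.Dict.keys_empty, PySem.Set.update_nil_left, PySem.Set.mem_ofList]
  simp only [pvPairs, List.map_map, List.mem_map, Function.comp, List.mem_filter,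
    decide_eq_true_eq, pvIsCand]
  constructor
  · rintro ⟨p, ⟨hmem, h0, hh⟩, rfl⟩
    exact ⟨h0, hh, p, (pvRM_mem _).1 hmem, rfl⟩
  · rintro ⟨h0, hh, p, hinb, rfl⟩
    exact ⟨p, ⟨(pvRM_mem _).2 hinb, h0, hh⟩, rfl⟩

lemma pvBuckets_keys_nodup {grid : List (List Int)} {rows cols high : Int} :
    (pvBuckets grid rows cols high).keys.Nodup := by
  rw [pvBuckets_eq, PySem.Dict.keys_foldl_modify_key _ Prod.fst [] (fun _ q => (· ++ [q.2])),
    PySem.Dict.keys_empty, PySem.Set.update_nil_left]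
  exact PySem.Set.nodup_ofList _

lemma pvReach_min {grid : List (List Int)} {rows cols v : Int} {c : Int × Int}
    (hr : 1 ≤ rows) (hc : 1 ≤ cols) (hv : v ≤ pvCell grid 0 0)
    (h : pvReach grid rows cols v c) :
    ∃ m, v ≤ m ∧ m ≤ pvCell grid 0 0 ∧ m ≤ pvCell grid c.1 c.2 ∧
      pvReach grid rows cols m c ∧ ∃ p, pvInb rows cols p ∧ pvCell grid p.1 p.2 = m := by
  induction h with
  | start =>
    exact ⟨pvCell grid 0 0, hv, le_refl _, le_refl _, .start,
      (0, 0), ⟨by omega, by omega, by omega, by omega⟩, rfl⟩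
  | @step p q hp hadj hq ih =>
    obtain ⟨m, h1, h2, h3, h4, wp, hw1, hw2⟩ := ih
    refine ⟨min m (pvCell grid q.1 q.2), le_min h1 hq.2, le_trans (min_le_left _ _) h2,
      min_le_right _ _, ?_, ?_⟩
    · exact .step (pvReach_mono (min_le_left _ _) h4) hadj ⟨hq.1, min_le_right _ _⟩
    · rcases le_total m (pvCell grid q.1 q.2) with hle | hle
      · exact ⟨wp, hw1, by rw [hw2]; omega⟩
      · exact ⟨q, hq.1, by omega⟩

lemma pvOuter_step {grid : List (List Int)} {rows cols high : Int}
    (hr : 1 ≤ rows) (hc : 1 ≤ cols) :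
    ∀ (cl : List Int) (visited : List (Int × Int)) (vprev : Int),
      (∀ p, p ∈ visited ↔ pvReach grid rows cols vprev p) →
      visited.Nodup →
      (∀ w ∈ cl, pvIsCand grid rows cols high w ∧ w < vprev) →
      (∀ w, pvIsCand grid rows cols high w → w < vprev → w ∈ cl) →
      cl.Pairwise (· > ·) →
      ¬ pvReach grid rows cols vprev (rows - 1, cols - 1) →
      vprev ≤ high + 1 →
      ((pvOuter grid rows cols (pvBuckets grid rows cols high) cl visited = 0 ∧
          ∀ w ∈ cl, ¬ pvReach grid rows cols w (rows - 1, cols - 1)) ∨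
        (pvOuter grid rows cols (pvBuckets grid rows cols high) cl visited ∈ cl ∧
          pvReach grid rows cols (pvOuter grid rows cols (pvBuckets grid rows cols high) cl visited) (rows - 1, cols - 1) ∧
          ∀ w ∈ cl, pvReach grid rows cols w (rows - 1, cols - 1) →
            w ≤ pvOuter grid rows cols (pvBuckets grid rows cols high) cl visited)) := by
  intro cl
  induction cl with
  | nil =>
    intro visited vprev _ _ _ _ _ _ _
    left
    exact ⟨by simp [pvOuter], by simp⟩
  | cons v rest ih =>
    intro visited vprev hmem hnd hcl hclcomp hsorted hnt hvh
    obtain ⟨hvcand, hvlt⟩ := hcl v List.mem_cons_self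
    have hv0 : ((0, 0) : Int × Int) ∈ visited := (hmem _).2 .start
    have hemp : visited.isEmpty = false := by
      cases visited with
      | nil => simp at hv0
      | cons a l => rfl
    have hbl_ok : ∀ q ∈ (pvBuckets grid rows cols high).getD v [], pvOk grid rows cols v q := by
      intro q hq
      obtain ⟨hinb, hval, _, _⟩ := (pvBuckets_getD v q).1 hq
      exact ⟨hinb, by omega⟩
    have hvisreach : ∀ p ∈ visited, pvReach grid rows cols v p := fun p hp =>
      pvReach_mono (le_of_lt hvlt) ((hmem p).1 hp)
    obtain ⟨seeds, heq, hnd2, hsub, hreach2, hcompl⟩ :=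
      pvSeed_fold ((pvBuckets grid rows cols high).getD v []) visited [] hbl_ok hvisreach hnd
    rw [List.nil_append] at heq
    have hInv : pvInv grid rows cols v (pvFuel rows cols) seeds (visited ++ seeds) := by
      refine ⟨hnd2, ?_, fun p hp => List.mem_append_right _ hp, (List.nodup_append.1 hnd2).2.1, ?_, ?_⟩
      · intro p hp
        rcases List.mem_append.1 hp with hp | hp
        · exact pvReach_inb hr hc ((hmem p).1 hp)
        · exact (hbl_ok p (hsub p hp)).1
      · intro p hp hpn d hd hokd
        have hpv : p ∈ visited := by
          rcases List.mem_append.1 hp with h | h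
          · exact h
          · exact absurd h hpn
        by_cases hge : pvCell grid (pvNbr p d).1 (pvNbr p d).2 ≥ vprev
        · refine List.mem_append_left _ ((hmem _).2 ?_)
          exact .step ((hmem p).1 hpv) ⟨d, hd, rfl⟩ ⟨hokd.1, hge⟩
        · have hwge : pvCell grid (pvNbr p d).1 (pvNbr p d).2 ≥ v := hokd.2
          have hv0' : 0 ≤ v := hvcand.1
          have hvhigh : v ≤ high := hvcand.2.1
          have hwlt : pvCell grid (pvNbr p d).1 (pvNbr p d).2 < vprev := by omega
          have hwcand : pvIsCand grid rows cols high (pvCell grid (pvNbr p d).1 (pvNbr p d).2) :=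
            ⟨by omega, by omega, pvNbr p d, hokd.1, rfl⟩
          rcases List.mem_cons.1 (hclcomp _ hwcand hwlt) with hwv | hwrest
          · refine hcompl (pvNbr p d) ?_ ⟨(-d.1, -d.2), pvDirs_neg d hd, by rw [pvNbr_neg]; exact hpv⟩
            exact (pvBuckets_getD v _).2 ⟨hokd.1, hwv, by omega, by omega⟩
          · exfalso
            have := (List.pairwise_cons.1 hsorted).1 _ hwrest
            omega
      · simp only [List.length_append, pvFuel]
        omega
    obtain ⟨hA, hB, hC, hD, hE⟩ := pvFlood_spec (pvFuel rows cols) seeds (visited ++ seeds) hInv hreach2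
    have hRiff : ∀ p, p ∈ pvFlood grid rows cols v (pvFuel rows cols) seeds (visited ++ seeds) ↔
        pvReach grid rows cols v p := by
      intro p
      refine ⟨hD p, fun hre => pvReach_mem_closed hre _ (hA _ (List.mem_append_left _ hv0)) hE⟩
    have hgoal : pvOuter grid rows cols (pvBuckets grid rows cols high) (v :: rest) visited =
        (if PySem.Set.contains (pvFlood grid rows cols v (pvFuel rows cols) seeds (visited ++ seeds)) (rows - 1, cols - 1) then v
         else pvOuter grid rows cols (pvBuckets grid rows cols high) rest
           (pvFlood grid rows cols v (pvFuel rows cols) seeds (visited ++ seeds))) := by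
      simp only [pvOuter, hemp, Bool.false_eq_true, if_false, heq]
    rw [hgoal]
    by_cases hT : PySem.Set.contains (pvFlood grid rows cols v (pvFuel rows cols) seeds (visited ++ seeds)) (rows - 1, cols - 1) = true
    · rw [if_pos hT]
      right
      refine ⟨List.mem_cons_self, (hRiff _).1 ((PySem.Set.contains_iff _ _).1 hT), ?_⟩
      intro w hw _
      rcases List.mem_cons.1 hw with rfl | hw
      · exact le_refl _
      · exact le_of_lt ((List.pairwise_cons.1 hsorted).1 _ hw)
    · rw [if_neg hT]
      have hnt' : ¬ pvReach grid rows cols v (rows - 1, cols - 1) := by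
        intro hre
        exact hT ((PySem.Set.contains_iff _ _).2 ((hRiff _).2 hre))
      have hres := ih (pvFlood grid rows cols v (pvFuel rows cols) seeds (visited ++ seeds)) v
        hRiff hB
        (fun w hw => ⟨(hcl w (List.mem_cons_of_mem _ hw)).1, (List.pairwise_cons.1 hsorted).1 _ hw⟩)
        (fun w hwc hwlt => by
          rcases List.mem_cons.1 (hclcomp w hwc (by omega)) with rfl | hw
          · exact absurd hwlt (lt_irrefl _)
          · exact hw)
        ((List.pairwise_cons.1 hsorted).2) hnt' (by have := hvcand.2.1; omega)
      rcases hres with ⟨h0, hall⟩ | ⟨hmemO, hreO, hmax⟩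
      · left
        refine ⟨h0, ?_⟩
        intro w hw
        rcases List.mem_cons.1 hw with rfl | hw
        · exact hnt'
        · exact hall w hw
      · right
        refine ⟨List.mem_cons_of_mem _ hmemO, hreO, ?_⟩
        intro w hw hre
        rcases List.mem_cons.1 hw with rfl | hw
        · exact absurd hre hnt'
        · exact hmax w hw hre

lemma pvOuter_empty {grid : List (List Int)} {rows cols high : Int}
    (hr : 1 ≤ rows) (hc : 1 ≤ cols) :
    ∀ (cl : List Int),
      (∀ w ∈ cl, pvIsCand grid rows cols high w) →
      (∀ w, pvIsCand grid rows cols high w → w ∈ cl) →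
      cl.Pairwise (· > ·) →
      ((pvOuter grid rows cols (pvBuckets grid rows cols high) cl [] = 0 ∧
          ∀ w ∈ cl, ¬ pvReach grid rows cols w (rows - 1, cols - 1)) ∨
        (pvOuter grid rows cols (pvBuckets grid rows cols high) cl [] ∈ cl ∧
          pvReach grid rows cols (pvOuter grid rows cols (pvBuckets grid rows cols high) cl []) (rows - 1, cols - 1) ∧
          ∀ w ∈ cl, pvReach grid rows cols w (rows - 1, cols - 1) →
            w ≤ pvOuter grid rows cols (pvBuckets grid rows cols high) cl [])) := by
  intro cl hclcand hclcomp hsorted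
  cases cl with
  | nil =>
    left
    exact ⟨by simp [pvOuter], by simp⟩
  | cons v rest =>
    have hvcand := hclcand v List.mem_cons_self
    have hInv : pvInv grid rows cols v (pvFuel rows cols) [(0, 0)] [(0, 0)] := by
      refine ⟨by simp, ?_, by simp, by simp, ?_, ?_⟩
      · intro p hp
        rcases List.mem_singleton.1 hp with rfl
        exact ⟨by omega, by omega, by omega, by omega⟩
      · intro p hp hpn
        exact absurd hp hpn
      · simp [pvFuel]; omega
    have hsound0 : ∀ p ∈ [((0 : Int), (0 : Int))], pvReach grid rows cols v p := by
      intro p hp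
      rcases List.mem_singleton.1 hp with rfl
      exact .start
    obtain ⟨hA, hB, hC, hD, hE⟩ := pvFlood_spec (pvFuel rows cols) [(0, 0)] [(0, 0)] hInv hsound0
    have hRiff : ∀ p, p ∈ pvFlood grid rows cols v (pvFuel rows cols) [(0, 0)] [(0, 0)] ↔
        pvReach grid rows cols v p := by
      intro p
      refine ⟨hD p, fun hre => pvReach_mem_closed hre _ (hA _ (by simp)) hE⟩
    have hgoal : pvOuter grid rows cols (pvBuckets grid rows cols high) (v :: rest) [] =
        (if PySem.Set.contains (pvFlood grid rows cols v (pvFuel rows cols) [(0, 0)] [(0, 0)]) (rows - 1, cols - 1) then v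
         else pvOuter grid rows cols (pvBuckets grid rows cols high) rest
           (pvFlood grid rows cols v (pvFuel rows cols) [(0, 0)] [(0, 0)])) := by
      simp only [pvOuter, List.isEmpty_nil, if_true]
      rfl
    rw [hgoal]
    by_cases hT : PySem.Set.contains (pvFlood grid rows cols v (pvFuel rows cols) [(0, 0)] [(0, 0)]) (rows - 1, cols - 1) = true
    · rw [if_pos hT]
      right
      refine ⟨List.mem_cons_self, (hRiff _).1 ((PySem.Set.contains_iff _ _).1 hT), ?_⟩
      intro w hw _
      rcases List.mem_cons.1 hw with rfl | hw
      · exact le_refl _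
      · exact le_of_lt ((List.pairwise_cons.1 hsorted).1 _ hw)
    · rw [if_neg hT]
      have hnt' : ¬ pvReach grid rows cols v (rows - 1, cols - 1) := by
        intro hre
        exact hT ((PySem.Set.contains_iff _ _).2 ((hRiff _).2 hre))
      have hres := pvOuter_step hr hc rest (pvFlood grid rows cols v (pvFuel rows cols) [(0, 0)] [(0, 0)]) v
        hRiff hB
        (fun w hw => ⟨hclcand w (List.mem_cons_of_mem _ hw), (List.pairwise_cons.1 hsorted).1 _ hw⟩)
        (fun w hwc hwlt => by
          rcases List.mem_cons.1 (hclcomp w hwc) with rfl | hw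
          · exact absurd hwlt (lt_irrefl _)
          · exact hw)
        ((List.pairwise_cons.1 hsorted).2) hnt' (by have := hvcand.2.1; omega)
      rcases hres with ⟨h0, hall⟩ | ⟨hmemO, hreO, hmax⟩
      · left
        refine ⟨h0, ?_⟩
        intro w hw
        rcases List.mem_cons.1 hw with rfl | hw
        · exact hnt'
        · exact hall w hw
      · right
        refine ⟨List.mem_cons_of_mem _ hmemO, hreO, ?_⟩
        intro w hw hre
        rcases List.mem_cons.1 hw with rfl | hw
        · exact absurd hre hnt'
        · exact hmax w hw hre

lemma pvFinal (grid : List (List Int)) (hpre : Pre_maximumMinimumPath grid) :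
    maximumMinimumPath grid = maximumMinimumPath_alt grid := by
  unfold Pre_maximumMinimumPath at hpre
  obtain ⟨hg1, hg2, _⟩ := hpre
  have hget : (PySem.List.pyGet? grid 0).getD [] = grid.headD [] := by
    cases grid with
    | nil => simp at hg1
    | cons g0 gs => simp [PySem.List.pyGet?_zero_cons]
  have hr : 1 ≤ PySem.List.len grid := by
    simp only [PySem.List.len_eq]
    omega
  have hc : 1 ≤ PySem.List.len ((PySem.List.pyGet? grid 0).getD []) := by
    rw [hget]
    simp only [PySem.List.len_eq]
    omega
  set rows : Int := PySem.List.len grid with hrows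
  set cols : Int := PySem.List.len ((PySem.List.pyGet? grid 0).getD []) with hcols
  set high : Int := min (pvCell grid 0 0) (pvCell grid (rows - 1) (cols - 1)) with hhigh
  have hA : maximumMinimumPath grid = pvBinSearch grid rows cols 0 high 0 := rfl
  have hB : maximumMinimumPath_alt grid =
      pvOuter grid rows cols (pvBuckets grid rows cols high)
        (PySem.List.sorted (pvBuckets grid rows cols high).keys (fun x => x) true) [] := rfl
  rw [hA, hB]
  -- A-side characterisation
  obtain ⟨ha0, ha1, ha2⟩ := pvBinSearch_spec (grid := grid) (rows := rows) (cols := cols) high hr hc 0 high 0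
    (le_refl 0) (le_refl high) (le_refl 0) (Or.inl rfl)
    (fun v hv1 hv2 _ => by omega)
    (fun v hv1 hv2 _ => by omega)
  set a : Int := pvBinSearch grid rows cols 0 high 0 with haeq
  -- B-side characterisation
  set cands : List Int := PySem.List.sorted (pvBuckets grid rows cols high).keys (fun x => x) true with hcands
  have hmemc : ∀ w ∈ cands, pvIsCand grid rows cols high w := fun w hw =>
    (pvBuckets_keys w).1 ((PySem.List.mem_sorted _ _ _ _).1 hw)
  have hcompc : ∀ w, pvIsCand grid rows cols high w → w ∈ cands := fun w hwc =>
    (PySem.List.mem_sorted _ _ _ _).2 ((pvBuckets_keys w).2 hwc)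
  have hpair : cands.Pairwise (· > ·) := by
    have h1 := PySem.List.sorted_pairwise_rev (pvBuckets grid rows cols high).keys (fun x => x)
    have h2 : cands.Nodup :=
      (PySem.List.sorted_perm (pvBuckets grid rows cols high).keys (fun x => x) true).nodup_iff.2
        pvBuckets_keys_nodup
    exact (h1.and h2).imp (fun {x y} h => lt_of_le_of_ne h.1 (fun he => h.2 he.symm))
  have hres := pvOuter_empty hr hc cands hmemc hcompc hpair
  set b : Int := pvOuter grid rows cols (pvBuckets grid rows cols high) cands [] with hbeq
  have hhigh00 : high ≤ pvCell grid 0 0 := min_le_left _ _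
  have hhight : high ≤ pvCell grid (rows - 1) (cols - 1) := min_le_right _ _
  rcases hres with ⟨hb0, hall⟩ | ⟨hbmem, hbre, hbmax⟩
  · -- no candidate reaches the target: both return 0
    rw [hb0]
    rcases ha1 with h | ⟨hPa, _⟩
    · exact h
    · exfalso
      obtain ⟨hvla, hre⟩ := (pvCheck_iff hr hc).1 hPa
      obtain ⟨m, ham, hm00, hmt, hmre, p, hpinb, hpval⟩ := pvReach_min hr hc hvla hre
      have hmt' : m ≤ pvCell grid (rows - 1) (cols - 1) := hmt
      have hmh : m ≤ high := le_min hm00 hmt'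
      have hmcand : pvIsCand grid rows cols high m := ⟨by omega, hmh, p, hpinb, hpval⟩
      exact hall m (hcompc m hmcand) hmre
  · -- b is the largest feasible candidate; show a = b
    obtain ⟨hb0', hbh, pb, hpbinb, hpbval⟩ := hmemc b hbmem
    have hPb : pvCheck grid rows cols b = true :=
      (pvCheck_iff hr hc).2 ⟨by omega, hbre⟩
    have hba : b ≤ a := by
      by_contra hab
      exact ha2 b (by omega) (by omega) hPb
    have hab : a ≤ b := by
      rcases ha1 with h | ⟨hPa, _⟩
      · omega
      · obtain ⟨hvla, hre⟩ := (pvCheck_iff hr hc).1 hPa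
        obtain ⟨m, ham, hm00, hmt, hmre, p, hpinb, hpval⟩ := pvReach_min hr hc hvla hre
        have hmt' : m ≤ pvCell grid (rows - 1) (cols - 1) := hmt
        have hmh : m ≤ high := le_min hm00 hmt'
        have hmcand : pvIsCand grid rows cols high m := ⟨by omega, hmh, p, hpinb, hpval⟩
        have := hbmax m (hcompc m hmcand) hmre
        omega
    omega

-- ===== VERDICT (by name: the statement is the Claim_ definition above) =====
theorem maximumMinimumPath_spec : Claim_equal_maximumMinimumPath := by
  intro grid _ hpre
  show maximumMinimumPath grid = maximumMinimumPath_alt grid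
  exact pvFinal grid hpre
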